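-- pv_equiv track=rewrite | github.com/iIonel/AILabs | LAB1/main.py | is_final
-- ===== SOURCE A (Python) =====
-- def is_final(st):
--     contor = 1
--     for i in range(3):
--         for j in range(3):
--             if st[i][j] != 0 and st[i][j] != contor:
--                 return 0
--             elif st[i][j] != 0 and st[i][j] == contor:
--                 contor = contor + 1
--     return 1
-- ===== SOURCE B (Python) =====
-- def is_final(st):
--     flat = [v for row in st[:3] for v in row[:3]]
--     ok = all(v == 0 or v == 1 + sum(1 for u in flat[:p] if u != 0)
--              for p, v in enumerate(flat))
--     return 1 if ok else 0
-- ===== Notes on version B (the rewrite author's own statement) =====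
-- stated objective: alternative
-- what changed: B replaces A's sequential stateful scan (running counter with early return) by an order-independent per-cell test: it flattens the 3x3 window and checks each nonzero cell independently against the count of nonzero cells in the flat prefix before it (a nested-count brute-force check with no threaded state and no early exit).
import Mathlib
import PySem

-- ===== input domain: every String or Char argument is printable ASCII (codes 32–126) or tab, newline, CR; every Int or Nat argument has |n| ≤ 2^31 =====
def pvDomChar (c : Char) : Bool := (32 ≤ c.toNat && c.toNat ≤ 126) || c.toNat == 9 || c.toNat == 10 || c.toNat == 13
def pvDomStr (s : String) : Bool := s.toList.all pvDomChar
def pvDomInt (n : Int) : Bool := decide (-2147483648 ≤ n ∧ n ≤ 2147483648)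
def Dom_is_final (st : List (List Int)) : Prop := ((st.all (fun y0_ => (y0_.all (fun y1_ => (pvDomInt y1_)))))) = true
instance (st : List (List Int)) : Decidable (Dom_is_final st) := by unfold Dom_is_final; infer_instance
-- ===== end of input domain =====

-- B replaces A's stateful sequential scan by an order-independent per-cell test:
-- each nonzero cell of the flattened window must equal 1 + the count of nonzero
-- cells before it (nested counting, no threaded counter, no early exit).

-- ===== PORT A =====
-- loop body: 'if v != 0 and v != contor: return 0 elif v != 0 and v == contor: contor += 1'
-- (none = early 'return 0'; contor carried in 'some')
def isFinalBody (contor v : Int) : Option Int :=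
  if v ≠ 0 ∧ v ≠ contor then none
  else if v ≠ 0 ∧ v = contor then some (contor + 1)
  else some contor

-- one iteration: reads st[i][j] (none also when the index raises, which Pre_ excludes)
def isFinalStep (st : List (List Int)) (s : Option Int) (i j : Int) : Option Int :=
  match s with
  | none => none
  | some contor =>
    match (PySem.List.pyGet? st i).bind (fun row => PySem.List.pyGet? row j) with
    | none => none
    | some v => isFinalBody contor v

def is_final (st : List (List Int)) : Int :=
  match (PySem.List.pyRange 0 3 1).foldl
          (fun s i => (PySem.List.pyRange 0 3 1).foldl (fun s j => isFinalStep st s i j) s)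
          (some 1) with
  | none => 0
  | some _ => 1

-- ===== PORT B =====
-- flat = [v for row in st[:3] for v in row[:3]]; 'all(v == 0 or v == 1 + sum(1 for u
-- in flat[:p] if u != 0) for p, v in enumerate(flat))'; slices via PySem.List.slice.
def is_final_alt (st : List (List Int)) : Int :=
  let flat := (PySem.List.slice st none (some 3)).flatMap
                (fun row => PySem.List.slice row none (some 3))
  if (PySem.List.enumerate flat 0).all
       (fun pv => pv.2 == 0 ||
         pv.2 == 1 + (((PySem.List.slice flat none (some pv.1)).filter
                         (fun u => u ≠ 0)).length : Int))
  then 1 else 0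

-- ===== PRECONDITION & SPEC =====
-- values of the cells A's row-major scan can reach before an IndexError: the first-3
-- columns of the first-3 rows, stopping at (and including) the first row shorter than 3
def pvPref (st : List (List Int)) : List Int :=
  match st with
  | [] => []
  | [r0] => if 3 ≤ r0.length then r0.take 3 else r0
  | [r0, r1] =>
    if 3 ≤ r0.length then
      (if 3 ≤ r1.length then r0.take 3 ++ r1.take 3 else r0.take 3 ++ r1)
    else r0
  | r0 :: r1 :: r2 :: _ =>
    if 3 ≤ r0.length then
      if 3 ≤ r1.length then r0.take 3 ++ r1.take 3 ++ r2.take 3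
      else r0.take 3 ++ r1
    else r0

-- the consecutive run 1, 2, …, n
def pvRun (n : Nat) : List Int := (List.range n).map (fun (k : Nat) => ((k : Int) + 1))

-- Pre_ is exactly where A returns: either the full 3x3 window exists, or the values A
-- reaches before the first missing cell already break the 1..k run (A returns 0 there);
-- excluded are only the inputs on which A raises IndexError.
def Pre_is_final (st : List (List Int)) : Prop :=
  (3 ≤ st.length ∧ ∀ row ∈ st.take 3, 3 ≤ row.length) ∨
    ¬ ((pvPref st).filter (fun v => v ≠ 0) =
        pvRun ((pvPref st).filter (fun v => v ≠ 0)).length)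
instance (st : List (List Int)) : Decidable (Pre_is_final st) := by
  unfold Pre_is_final; infer_instance

def pvWitness_is_final : List (List Int) := [[1, 2, 3], [4, 5, 6], [7, 8, 0]]

def Spec_is_final (st : List (List Int)) (out : Int) : Prop := out = is_final_alt st
instance (st : List (List Int)) (out : Int) : Decidable (Spec_is_final st out) := by
  unfold Spec_is_final; infer_instance

-- ===== CLAIM (what is proved, stated in full; the proofs are below) =====
def Claim_equal_is_final : Prop :=
  ∀ (st : List (List Int)), Dom_is_final st → Pre_is_final st →
    Spec_is_final st (is_final st)


-- ===== LEMMAS AND PROOFS =====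

-- A's loop body as a function of the cell value only
def pvBodyF (s : Option Int) (v : Int) : Option Int :=
  match s with
  | none => none
  | some c => isFinalBody c v

theorem pvFoldl_bodyF_none (xs : List Int) : xs.foldl pvBodyF none = none := by
  induction xs with
  | nil => rfl
  | cons v xs ih => simpa [pvBodyF] using ih

-- B's per-cell condition as a Prop
def pvPred (c : Int) (xs : List Int) : Prop :=
  ∀ (p : Nat) (h : p < xs.length),
    xs[p] = 0 ∨ xs[p] = c + (((xs.take p).filter (fun u => u ≠ 0)).length : Int)

theorem pvPred_cons_zero (c : Int) (xs : List Int) :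
    pvPred c (0 :: xs) ↔ pvPred c xs := by
  constructor
  · intro h p hp
    have := h (p + 1) (by simpa using Nat.succ_lt_succ hp)
    simpa [pvPred, List.getElem_cons_succ, List.take_succ_cons] using this
  · intro h p hp
    cases p with
    | zero => exact Or.inl (by simp)
    | succ q =>
      have := h q (by simpa using hp)
      simpa [List.getElem_cons_succ, List.take_succ_cons] using this

theorem pvPred_cons_ne (c v : Int) (xs : List Int) (hv : v ≠ 0) :
    pvPred c (v :: xs) ↔ (v = c ∧ pvPred (c + 1) xs) := by
  constructor
  · intro h
    have h0 := h 0 (by simp)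
    simp at h0
    have hvc : v = c := by
      rcases h0 with h0 | h0
      · exact absurd h0 hv
      · simpa using h0
    refine ⟨hvc, ?_⟩
    intro p hp
    have := h (p + 1) (by simpa using Nat.succ_lt_succ hp)
    simp [List.getElem_cons_succ, List.take_succ_cons, hv] at this
    rcases this with h' | h'
    · exact Or.inl h'
    · right; rw [h']; simp only [ne_eq, decide_not]; ring
  · rintro ⟨rfl, h⟩ p hp
    cases p with
    | zero => right; simp
    | succ q =>
      have := h q (by simpa using hp)
      rcases this with h' | h'
      · exact Or.inl (by simpa using h')
      · right
        simp [List.getElem_cons_succ, List.take_succ_cons, hv]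
        rw [h']; simp only [ne_eq, decide_not]; ring
  
-- A's value-fold survives iff every nonzero value equals c + (count of earlier nonzeros)
theorem pvFold_iff (xs : List Int) : ∀ c : Int,
    ((xs.foldl pvBodyF (some c)).isSome = true) ↔ pvPred c xs := by
  induction xs with
  | nil =>
    intro c
    constructor
    · intro _ p hp; exact absurd hp (by simp)
    · intro _; simp
  | cons v xs ih =>
    intro c
    by_cases hv : v = 0
    · subst hv
      rw [List.foldl_cons, show pvBodyF (some c) 0 = some c by simp [pvBodyF, isFinalBody],
        ih c, pvPred_cons_zero]
    · by_cases hc : v = c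
      · subst hc
        rw [List.foldl_cons, show pvBodyF (some v) v = some (v + 1) by
            simp [pvBodyF, isFinalBody, hv],
          ih (v + 1), pvPred_cons_ne _ _ _ hv]
        simp
      · rw [List.foldl_cons, show pvBodyF (some c) v = none by
            simp [pvBodyF, isFinalBody, hv, hc],
          pvFoldl_bodyF_none]
        constructor
        · intro h; cases h
        · intro h
          have h0 := h 0 (by simp)
          simp at h0
          rcases h0 with h0 | h0
          · exact absurd h0 hv
          · exact absurd (by simpa using h0) hc

-- st[:3] written with slice is take 3
theorem pvSlice3 {α : Type} (xs : List α) :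
    PySem.List.slice xs none (some 3) = xs.take 3 := by
  have := PySem.List.slice_to_natCast xs 3
  simpa using this

-- B's Bool condition over enumerate is exactly pvPred 1
theorem pvCond_iff (xs : List Int) :
    ((PySem.List.enumerate xs 0).all
       (fun pv => pv.2 == 0 ||
         pv.2 == 1 + (((PySem.List.slice xs none (some pv.1)).filter
                         (fun u => u ≠ 0)).length : Int)) = true) ↔ pvPred 1 xs := by
  rw [List.all_eq_true]
  constructor
  · intro h p hp
    have hm : ((0 : Int) + (p : Int), xs[p]) ∈ PySem.List.enumerate xs 0 :=
      (PySem.List.mem_enumerate_iff _ _ _).mpr ⟨p, hp, rfl⟩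
    have := h _ hm
    simp only [zero_add, PySem.List.slice_to_natCast] at this
    simpa using this
  · intro h pv hmem
    obtain ⟨k, hk, rfl⟩ := (PySem.List.mem_enumerate_iff _ _ _).mp hmem
    have := h k hk
    simp only [zero_add, PySem.List.slice_to_natCast]
    simpa using this

theorem pvAlt_one (st : List (List Int))
    (h : pvPred 1 ((st.take 3).flatMap (fun r => r.take 3))) : is_final_alt st = 1 := by
  unfold is_final_alt
  simp only [pvSlice3]
  rw [if_pos ((pvCond_iff _).mpr h)]

theorem pvAlt_zero (st : List (List Int))
    (h : ¬ pvPred 1 ((st.take 3).flatMap (fun r => r.take 3))) : is_final_alt st = 0 := by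
  unfold is_final_alt
  simp only [pvSlice3]
  rw [if_neg (fun hc => h ((pvCond_iff _).mp hc))]

-- pvPred restricts to prefixes
theorem pvPred_append (c : Int) (p r : List Int) (h : pvPred c (p ++ r)) : pvPred c p := by
  intro q hq
  have hq' : q < (p ++ r).length := by simp; omega
  have := h q hq'
  have hget : (p ++ r)[q]'hq' = p[q] := List.getElem_append_left hq
  have htake : (p ++ r).take q = p.take q := by
    rw [List.take_append]
    simp [Nat.sub_eq_zero_of_le (Nat.le_of_lt hq)]
  rwa [hget, htake] at this

-- characterisation of A's scan: it survives iff the nonzero values are c, c+1, …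
theorem pvBodyF_char (xs : List Int) (c : Int) :
    (xs.foldl pvBodyF (some c)).isSome = true ↔
      xs.filter (fun v => v ≠ 0) =
        (List.range ((xs.filter (fun v => v ≠ 0)).length)).map (fun (k : Nat) => c + (k : Int)) := by
  induction xs generalizing c with
  | nil => exact ⟨fun _ => rfl, fun _ => rfl⟩
  | cons v xs ih =>
    by_cases hv : v = 0
    · subst hv
      simpa [List.foldl, pvBodyF, isFinalBody] using ih c
    · have hf : List.filter (fun x => x ≠ 0) (v :: xs) = v :: xs.filter (fun x => x ≠ 0) := by
        simp [hv]
      by_cases hc : v = c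
      · subst hc
        rw [List.foldl_cons]
        have hb : pvBodyF (some v) v = some (v + 1) := by
          simp [pvBodyF, isFinalBody, hv]
        rw [hb, ih (v + 1), hf]
        constructor
        · intro h
          simp only [List.length_cons, List.range_succ_eq_map, List.map_cons, List.map_map]
          refine List.cons_eq_cons.mpr ⟨by simp, ?_⟩
          conv_lhs => rw [h]
          exact List.map_congr_left (fun x _ => by simp only [Function.comp_apply]; push_cast; ring)
        · intro h
          simp only [List.length_cons, List.range_succ_eq_map, List.map_cons, List.map_map] at h
          rcases List.cons_eq_cons.mp h with ⟨_, h2⟩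
          conv_lhs => rw [h2]
          exact List.map_congr_left (fun x _ => by simp only [Function.comp_apply]; push_cast; ring)
      · rw [List.foldl_cons]
        have hb : pvBodyF (some c) v = none := by
          simp [pvBodyF, isFinalBody, hv, hc]
        rw [hb, pvFoldl_bodyF_none, hf]
        simp only [Option.isSome_none]
        constructor
        · intro h; exact absurd h (by decide)
        · intro h
          simp only [List.length_cons, List.range_succ_eq_map, List.map_cons] at h
          rcases List.cons_eq_cons.mp h with ⟨h1, _⟩
          exact absurd (by simpa using h1) hc

theorem pvStep_cell (st : List (List Int)) (i j v : Int)
    (h : (PySem.List.pyGet? st i).bind (fun row => PySem.List.pyGet? row j) = some v)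
    (s : Option Int) : isFinalStep st s i j = pvBodyF s v := by
  cases s <;> simp [isFinalStep, pvBodyF, h]

theorem pvGet3 {α : Type} (x y z : α) (t : List α) (j : Int) (hj : j = 0 ∨ j = 1 ∨ j = 2) :
    PySem.List.pyGet? (x :: y :: z :: t) j =
      some (if j = 0 then x else if j = 1 then y else z) := by
  rcases hj with rfl | rfl | rfl <;>
    simp [PySem.List.pyGet?_of_nonneg]

-- A reduces, on a full 3x3 window, to the value-fold of pvBodyF over the nine cells
theorem pvA_reduce (a b c d e f g h i : Int) (t0 t1 t2 : List Int) (r : List (List Int)) :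
    is_final ((a :: b :: c :: t0) :: (d :: e :: f :: t1) :: (g :: h :: i :: t2) :: r) =
      (match [a, b, c, d, e, f, g, h, i].foldl pvBodyF (some 1) with
       | none => (0 : Int)
       | some _ => 1) := by
  have hr : PySem.List.pyRange 0 3 1 = ([0, 1, 2] : List Int) := by decide
  have hrow : ∀ j : Int, j = 0 ∨ j = 1 ∨ j = 2 →
      PySem.List.pyGet? ((a :: b :: c :: t0) :: (d :: e :: f :: t1) :: (g :: h :: i :: t2) :: r) j
        = some (if j = 0 then a :: b :: c :: t0 else if j = 1 then d :: e :: f :: t1 else g :: h :: i :: t2) :=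
    fun j hj => pvGet3 _ _ _ _ j hj
  have h00 := pvStep_cell _ 0 0 a (by rw [hrow 0 (by omega)]; simp [pvGet3 a b c t0 0 (by omega)])
  have h01 := pvStep_cell _ 0 1 b (by rw [hrow 0 (by omega)]; simp [pvGet3 a b c t0 1 (by omega)])
  have h02 := pvStep_cell _ 0 2 c (by rw [hrow 0 (by omega)]; simp [pvGet3 a b c t0 2 (by omega)])
  have h10 := pvStep_cell _ 1 0 d (by rw [hrow 1 (by omega)]; simp [pvGet3 d e f t1 0 (by omega)])
  have h11 := pvStep_cell _ 1 1 e (by rw [hrow 1 (by omega)]; simp [pvGet3 d e f t1 1 (by omega)])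
  have h12 := pvStep_cell _ 1 2 f (by rw [hrow 1 (by omega)]; simp [pvGet3 d e f t1 2 (by omega)])
  have h20 := pvStep_cell _ 2 0 g (by rw [hrow 2 (by omega)]; simp [pvGet3 g h i t2 0 (by omega)])
  have h21 := pvStep_cell _ 2 1 h (by rw [hrow 2 (by omega)]; simp [pvGet3 g h i t2 1 (by omega)])
  have h22 := pvStep_cell _ 2 2 i (by rw [hrow 2 (by omega)]; simp [pvGet3 g h i t2 2 (by omega)])
  simp only [is_final, hr, List.foldl_cons, List.foldl_nil,
    h00, h01, h02, h10, h11, h12, h20, h21, h22]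

-- cells of the scan, in row-major order
def pvCells : List (Int × Int) :=
  [(0,0),(0,1),(0,2),(1,0),(1,1),(1,2),(2,0),(2,1),(2,2)]

theorem pvChain_eq (st : List (List Int)) :
    is_final st =
      (match pvCells.foldl (fun s c => isFinalStep st s c.1 c.2) (some 1) with
       | none => (0 : Int)
       | some _ => 1) := by
  have hr : PySem.List.pyRange 0 3 1 = ([0, 1, 2] : List Int) := by decide
  simp only [is_final, hr, pvCells, List.foldl_cons, List.foldl_nil]

theorem pvStep_cellNone (st : List (List Int)) (i j : Int)
    (h : (PySem.List.pyGet? st i).bind (fun row => PySem.List.pyGet? row j) = none)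
    (s : Option Int) : isFinalStep st s i j = none := by
  cases s <;> simp [isFinalStep, h]

theorem pvFoldCells_noneState (st : List (List Int)) (cs : List (Int × Int)) :
    cs.foldl (fun s c => isFinalStep st s c.1 c.2) none = none := by
  induction cs with
  | nil => rfl
  | cons c cs ih => simpa [isFinalStep] using ih

theorem pvFoldCells_none (st : List (List Int)) (cs : List (Int × Int)) (i j : Int)
    (hmem : (i, j) ∈ cs)
    (h : (PySem.List.pyGet? st i).bind (fun row => PySem.List.pyGet? row j) = none)
    (s : Option Int) : cs.foldl (fun s c => isFinalStep st s c.1 c.2) none = none ∧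
      cs.foldl (fun s c => isFinalStep st s c.1 c.2) s = none := by
  refine ⟨pvFoldCells_noneState st cs, ?_⟩
  induction cs generalizing s with
  | nil => cases hmem
  | cons c cs ih =>
    rcases List.mem_cons.mp hmem with h1 | h1
    · rw [List.foldl_cons]
      have : isFinalStep st s c.1 c.2 = none := by
        rw [← h1]; exact pvStep_cellNone st i j h s
      rw [this, pvFoldCells_noneState]
    · rw [List.foldl_cons]; exact ih h1 _

-- a grid without the full 3x3 window has a reachable out-of-range cell
theorem pvNotFull (st : List (List Int))
    (hn : ¬ (3 ≤ st.length ∧ ∀ row ∈ st.take 3, 3 ≤ row.length)) :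
    ∃ i j : Int, (i, j) ∈ pvCells ∧
      (PySem.List.pyGet? st i).bind (fun row => PySem.List.pyGet? row j) = none := by
  push Not at hn
  by_cases hlen : 3 ≤ st.length
  · obtain ⟨row, hmem, hshort⟩ := hn hlen
    obtain ⟨n, hn3, hget⟩ := List.getElem_of_mem hmem
    have hmin := hn3
    rw [List.length_take] at hmin
    have hnlt : n < 3 := by omega
    have hnst : n < st.length := by omega
    refine ⟨(n : Int), (row.length : Int), ?_, ?_⟩
    · have hc1 : n = 0 ∨ n = 1 ∨ n = 2 := by omega
      have hc2 : row.length = 0 ∨ row.length = 1 ∨ row.length = 2 := by omega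
      rcases hc1 with rfl | rfl | rfl <;> rcases hc2 with h2 | h2 | h2 <;>
        rw [h2] <;> decide
    · have hrow : PySem.List.pyGet? st (n : Int) = some row := by
        rw [PySem.List.pyGet?_natCast]
        have htk : (st.take 3)[n]? = some row := by
          rw [List.getElem?_eq_getElem hn3, hget]
        rwa [List.getElem?_take_of_lt hnlt] at htk
      rw [hrow, Option.bind_some]
      rw [PySem.List.pyGet?_eq_none_iff]
      simp [PySem.Raise.InRange]
  · refine ⟨(st.length : Int), 0, ?_, ?_⟩
    · have hc : st.length = 0 ∨ st.length = 1 ∨ st.length = 2 := by omega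
      rcases hc with h | h | h <;> rw [h] <;> decide
    · have : PySem.List.pyGet? st (st.length : Int) = none := by
        rw [PySem.List.pyGet?_eq_none_iff]
        simp [PySem.Raise.InRange]
      rw [this, Option.bind_none]

-- the window B reads extends the cells A can reach
theorem pvPref_isPrefix (st : List (List Int)) :
    ∃ rest, (st.take 3).flatMap (fun r => r.take 3) = pvPref st ++ rest := by
  match st with
  | [] => exact ⟨[], rfl⟩
  | [r0] =>
    by_cases h0 : 3 ≤ r0.length
    · exact ⟨[], by simp [pvPref, h0]⟩
    · exact ⟨[], by simp [pvPref, h0, List.take_of_length_le (by omega : r0.length ≤ 3)]⟩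
  | [r0, r1] =>
    by_cases h0 : 3 ≤ r0.length
    · by_cases h1 : 3 ≤ r1.length
      · exact ⟨[], by simp [pvPref, h0, h1]⟩
      · exact ⟨[], by simp [pvPref, h0, h1, List.take_of_length_le (by omega : r1.length ≤ 3)]⟩
    · exact ⟨r1.take 3, by simp [pvPref, h0, List.take_of_length_le (by omega : r0.length ≤ 3)]⟩
  | r0 :: r1 :: r2 :: t =>
    by_cases h0 : 3 ≤ r0.length
    · by_cases h1 : 3 ≤ r1.length
      · exact ⟨[], by simp [pvPref, h0, h1, List.take_succ_cons, List.flatMap_cons]⟩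
      · exact ⟨r2.take 3, by
          simp [pvPref, h0, h1, List.take_succ_cons, List.flatMap_cons,
            List.take_of_length_le (by omega : r1.length ≤ 3)]⟩
    · exact ⟨r1.take 3 ++ r2.take 3, by
        simp [pvPref, h0, List.take_succ_cons, List.flatMap_cons,
          List.take_of_length_le (by omega : r0.length ≤ 3)]⟩

theorem pvMain (st : List (List Int)) (hp : Pre_is_final st) :
    is_final st = is_final_alt st := by
  by_cases hfull : 3 ≤ st.length ∧ ∀ row ∈ st.take 3, 3 ≤ row.length
  case neg =>
    have hE : ¬ ((pvPref st).filter (fun v => v ≠ 0) =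
        pvRun ((pvPref st).filter (fun v => v ≠ 0)).length) := by
      rcases hp with h | h
      · exact absurd h hfull
      · exact h
    obtain ⟨i, j, hmem, hnone⟩ := pvNotFull st hfull
    have hA : is_final st = 0 := by
      rw [pvChain_eq, (pvFoldCells_none st pvCells i j hmem hnone (some 1)).2]
    -- the prefix breaks the run, so A's value-fold over it dies …
    have hfold : ¬ (((pvPref st).foldl pvBodyF (some 1)).isSome = true) := by
      rw [pvBodyF_char]
      intro hcon
      refine hE ?_
      conv_lhs => rw [hcon]
      unfold pvRun
      exact List.map_congr_left (fun x _ => add_comm 1 (x : Int))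
    -- … hence pvPred 1 fails on the prefix, hence on the whole flat window
    have hnpP : ¬ pvPred 1 (pvPref st) := fun hpred => hfold ((pvFold_iff _ 1).mpr hpred)
    obtain ⟨rest, hw⟩ := pvPref_isPrefix st
    have hnpF : ¬ pvPred 1 ((st.take 3).flatMap (fun r => r.take 3)) := by
      rw [hw]
      exact fun hpred => hnpP (pvPred_append 1 _ _ hpred)
    rw [hA, pvAlt_zero st hnpF]
  case pos =>
  obtain ⟨hlen, hrows⟩ := hfull
  match st, hlen with
  | r0 :: r1 :: r2 :: r, _ =>
    have h0 : 3 ≤ r0.length := hrows r0 (by simp [List.take])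
    have h1 : 3 ≤ r1.length := hrows r1 (by simp [List.take])
    have h2 : 3 ≤ r2.length := hrows r2 (by simp [List.take])
    match r0, h0 with
    | a :: b :: c :: t0, _ =>
    match r1, h1 with
    | d :: e :: f :: t1, _ =>
    match r2, h2 with
    | g :: h :: i :: t2, _ =>
      rw [pvA_reduce]
      have hflat : (((a :: b :: c :: t0) :: (d :: e :: f :: t1) :: (g :: h :: i :: t2) :: r).take 3).flatMap
            (fun row => row.take 3) = [a, b, c, d, e, f, g, h, i] := by
        simp [List.take_succ_cons, List.flatMap_cons]
      cases hF : ([a, b, c, d, e, f, g, h, i].foldl pvBodyF (some 1)) with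
      | some v =>
        have hs : pvPred 1 [a, b, c, d, e, f, g, h, i] :=
          (pvFold_iff _ 1).mp (by rw [hF]; rfl)
        rw [pvAlt_one _ (by rw [hflat]; exact hs)]
      | none =>
        have hs : ¬ pvPred 1 [a, b, c, d, e, f, g, h, i] := by
          intro hpred
          have := (pvFold_iff _ 1).mpr hpred
          rw [hF] at this
          cases this
        rw [pvAlt_zero _ (by rw [hflat]; exact hs)]

-- ===== VERDICT (by name: the statement is the Claim_ definition above) =====
theorem is_final_spec : Claim_equal_is_final := by
  intro st _ hp
  exact pvMain st hp
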